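-- pv_equiv track=rewrite | github.com/RevEngin3r/PanahianSiteRipper | dw_all.py | fix_title
-- ===== SOURCE A (Python) =====
-- def fix_title(title: str):
--     rms = [
--         ['|', '-'],
--         ['\n', ''],
--         ['(', ''],
--         [')', ''],
--         ['\xa0', ''],
--         ['\u200c', ''],
--         ['*', ''],
--         ['?', ''],
--         ['\\', ''],
--         ['/', ''],
--         ['"', ''],
--         [':', ''],
--         ['<', ''],
--         ['>', ''],
--     ]
--     for rm in rms:
--         title = title.replace(rm[0], rm[1])
--     return title
-- ===== SOURCE B (Python) =====
-- _TABLE = str.maketrans({'|': '-', '\n': None, '(': None, ')': None,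
--                         '\xa0': None, '\u200c': None, '*': None, '?': None,
--                         '\\': None, '/': None, '"': None, ':': None,
--                         '<': None, '>': None})
--
-- def fix_title(title: str):
--     return title.translate(_TABLE)
-- ===== Notes on version B (the rewrite author's own statement) =====
-- stated objective: idiomatic
-- what changed: Replaced the 14 sequential str.replace passes with a single translation table built once via str.maketrans and one title.translate pass.
import Mathlib
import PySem

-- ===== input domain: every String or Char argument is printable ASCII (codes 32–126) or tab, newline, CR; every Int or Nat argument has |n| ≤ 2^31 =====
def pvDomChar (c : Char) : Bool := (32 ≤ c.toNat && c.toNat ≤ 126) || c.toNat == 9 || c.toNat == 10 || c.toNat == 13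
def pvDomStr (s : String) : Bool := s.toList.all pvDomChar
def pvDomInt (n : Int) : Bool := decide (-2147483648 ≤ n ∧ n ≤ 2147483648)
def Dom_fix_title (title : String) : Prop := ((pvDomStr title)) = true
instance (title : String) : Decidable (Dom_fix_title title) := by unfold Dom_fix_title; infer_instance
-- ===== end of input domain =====

-- B replaces A's 14 sequential str.replace passes with one translation-table pass (idiomatic str.translate).

-- ===== PORT A =====
-- the list of [old, new] pairs, as in A
def pvRms : List (String × String) :=
  [("|", "-"), ("\n", ""), ("(", ""), (")", ""), ("\u00a0", ""), ("\u200c", ""),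
   ("*", ""), ("?", ""), ("\\", ""), ("/", ""), ("\"", ""), (":", ""), ("<", ""), (">", "")]

def fix_title (title : String) : String :=
  pvRms.foldl (fun t rm => PySem.Str.replace t rm.1 rm.2) title

-- ===== PORT B =====
-- per-character image under B's translation table: '|' ↦ "-", the deleted chars ↦ "", others kept
def pvTrans (c : Char) : List Char :=
  if c = '|' then ['-']
  else if c = '\n' ∨ c = '(' ∨ c = ')' ∨ c = '\u00a0' ∨ c = '\u200c' ∨ c = '*' ∨
          c = '?' ∨ c = '\\' ∨ c = '/' ∨ c = '"' ∨ c = ':' ∨ c = '<' ∨ c = '>' then []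
  else [c]

def fix_title_alt (title : String) : String :=
  String.ofList (title.toList.flatMap pvTrans)

-- ===== PRECONDITION & SPEC =====
def Spec_fix_title (title : String) (out : String) : Prop := out = fix_title_alt title
instance (title : String) (out : String) : Decidable (Spec_fix_title title out) := by unfold Spec_fix_title; infer_instance

-- ===== CLAIM (what is proved, stated in full; the proofs are below) =====
def Claim_equal_fix_title : Prop := ∀ (title : String), Dom_fix_title title → Spec_fix_title title (fix_title title)

-- ===== LEMMAS AND PROOFS =====

-- single-char replace is a flatMap over the characters
lemma replace_go_singleton (o : Char) (new : List Char) :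
    ∀ (l acc : List Char) (fuel : Nat), l.length ≤ fuel →
    PySem.Chars.replace.go [o] new fuel l acc
      = acc.reverse ++ l.flatMap (fun c => if c = o then new else [c]) := by
  intro l
  induction l with
  | nil =>
    intro acc fuel _
    cases fuel <;> simp [PySem.Chars.replace.go]
  | cons c t ih =>
    intro acc fuel hf
    cases fuel with
    | zero => simp at hf
    | succ n =>
      simp only [PySem.Chars.replace.go]
      by_cases hc : c = o
      · have : List.isPrefixOf [o] (c :: t) = true := by
          simp [List.isPrefixOf, hc]
        rw [if_pos this]
        have ht : t.length ≤ n := by simpa using hf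
        rw [show List.drop (List.length [o]) (c :: t) = t by simp]
        rw [ih _ n ht]
        simp [hc]
      · have : List.isPrefixOf [o] (c :: t) = false := by
          simp [List.isPrefixOf]
          exact fun h => (hc h.symm).elim
        rw [if_neg (by simp [this])]
        have ht : t.length ≤ n := by simpa using hf
        rw [ih _ n ht]
        simp [hc]

lemma replace_singleton (l : List Char) (o : Char) (new : List Char) :
    PySem.Chars.replace l [o] new = l.flatMap (fun c => if c = o then new else [c]) := by
  rw [PySem.Chars.replace]
  simp only [List.isEmpty_cons, Bool.false_eq_true, if_false]
  simpa using replace_go_singleton o new l [] l.length le_rfl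

-- ===== VERDICT (by name: the statement is the Claim_ definition above) =====
theorem fix_title_spec : Claim_equal_fix_title := by
  intro title _
  unfold Spec_fix_title fix_title fix_title_alt pvRms
  simp only [List.foldl, PySem.Str.replace, String.toList_ofList]
  simp only [show "|".toList = ['|'] from rfl, show "-".toList = ['-'] from rfl,
    show "".toList = ([] : List Char) from rfl, show "\n".toList = ['\n'] from rfl,
    show "(".toList = ['('] from rfl, show ")".toList = [')'] from rfl,
    show "\u00a0".toList = ['\u00a0'] from rfl, show "\u200c".toList = ['\u200c'] from rfl,
    show "*".toList = ['*'] from rfl, show "?".toList = ['?'] from rfl,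
    show "\\".toList = ['\\'] from rfl, show "/".toList = ['/'] from rfl,
    show "\"".toList = ['"'] from rfl, show ":".toList = [':'] from rfl,
    show "<".toList = ['<'] from rfl, show ">".toList = ['>'] from rfl]
  rw [replace_singleton, replace_singleton, replace_singleton, replace_singleton,
      replace_singleton, replace_singleton, replace_singleton, replace_singleton,
      replace_singleton, replace_singleton, replace_singleton, replace_singleton,
      replace_singleton, replace_singleton]
  simp only [List.flatMap_assoc]
  refine congrArg String.ofList (List.flatMap_congr ?_)
  intro c _
  by_cases h1 : c = '|'
  · subst h1; decide
  by_cases h2 : c = '\n'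
  · subst h2; decide
  by_cases h3 : c = '('
  · subst h3; decide
  by_cases h4 : c = ')'
  · subst h4; decide
  by_cases h5 : c = '\u00a0'
  · subst h5; decide
  by_cases h6 : c = '\u200c'
  · subst h6; decide
  by_cases h7 : c = '*'
  · subst h7; decide
  by_cases h8 : c = '?'
  · subst h8; decide
  by_cases h9 : c = '\\'
  · subst h9; decide
  by_cases h10 : c = '/'
  · subst h10; decide
  by_cases h11 : c = '"'
  · subst h11; decide
  by_cases h12 : c = ':'
  · subst h12; decide
  by_cases h13 : c = '<'
  · subst h13; decide
  by_cases h14 : c = '>'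
  · subst h14; decide
  simp [pvTrans, h1, h2, h3, h4, h5, h6, h7, h8, h9, h10, h11, h12, h13, h14]
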